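-- pv_equiv track=rewrite | github.com/IceroDev/GardenClash | console.py | coloured_name
-- ===== SOURCE A (Python) =====
-- def coloured_name(gametitle):
--     coloured_name = ""
--     count = 0
--     for lettre in gametitle:
--         if (count <= len(gametitle) / 2):
--             coloured_name = coloured_name + "\x1b[0;33;40m" + lettre + "\x1b[0m"
--         else:
--             coloured_name = coloured_name + "\x1b[0;34;40m" + lettre + "\x1b[0m"
--         count = count + 1
--     return coloured_name
-- ===== SOURCE B (Python) =====
-- def coloured_name(gametitle):
--     k = len(gametitle) // 2 + 1
--     head, tail = gametitle[:k], gametitle[k:]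
--     return ("".join("\x1b[0;33;40m" + c + "\x1b[0m" for c in head)
--             + "".join("\x1b[0;34;40m" + c + "\x1b[0m" for c in tail))
-- ===== Notes on version B (the rewrite author's own statement) =====
-- stated objective: faster
-- what changed: B precomputes the split index k = len//2 + 1 and wraps the two slices in two uniform branchless join passes, instead of A's single loop with a per-character counter/branch and repeated string concatenation.
import Mathlib
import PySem

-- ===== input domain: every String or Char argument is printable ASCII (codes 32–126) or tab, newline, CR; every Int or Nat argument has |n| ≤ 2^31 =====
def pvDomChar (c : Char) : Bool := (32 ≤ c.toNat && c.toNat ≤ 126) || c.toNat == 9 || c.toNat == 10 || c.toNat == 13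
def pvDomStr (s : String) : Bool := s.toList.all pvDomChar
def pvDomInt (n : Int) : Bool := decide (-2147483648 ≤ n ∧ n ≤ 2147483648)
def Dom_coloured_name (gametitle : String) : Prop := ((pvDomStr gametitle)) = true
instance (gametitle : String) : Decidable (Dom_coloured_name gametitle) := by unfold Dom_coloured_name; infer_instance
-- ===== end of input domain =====

-- B replaces A's per-character counter/branch loop by a precomputed split index and two uniform passes (objective: simpler).

-- ===== PORT A =====
-- A's loop, building the output left to right; `count <= len(g)/2` (float division)
-- is exact on ints as `2*count ≤ n`.
def coloured_name_loop (n : Nat) : List Char → Nat → List Char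
  | [], _ => []
  | c :: cs, count =>
      (if 2 * count ≤ n
        then "\x1b[0;33;40m".toList ++ [c] ++ "\x1b[0m".toList
        else "\x1b[0;34;40m".toList ++ [c] ++ "\x1b[0m".toList)
      ++ coloured_name_loop n cs (count + 1)

def coloured_name (gametitle : String) : String :=
  String.mk (coloured_name_loop gametitle.toList.length gametitle.toList 0)

-- ===== PORT B =====
def coloured_name_wrap (code : List Char) (c : Char) : List Char :=
  code ++ [c] ++ "\x1b[0m".toList

def coloured_name_alt (gametitle : String) : String :=
  let l := gametitle.toList
  let k := l.length / 2 + 1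
  String.mk ((l.take k).flatMap (coloured_name_wrap "\x1b[0;33;40m".toList)
             ++ (l.drop k).flatMap (coloured_name_wrap "\x1b[0;34;40m".toList))

-- ===== PRECONDITION & SPEC =====
def Spec_coloured_name (gametitle : String) (out : String) : Prop := out = coloured_name_alt gametitle
instance (gametitle : String) (out : String) : Decidable (Spec_coloured_name gametitle out) := by unfold Spec_coloured_name; infer_instance

-- ===== CLAIM (what is proved, stated in full; the proofs are below) =====
def Claim_equal_coloured_name : Prop := ∀ (gametitle : String), Dom_coloured_name gametitle → Spec_coloured_name gametitle (coloured_name gametitle)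

-- ===== LEMMAS AND PROOFS =====
theorem coloured_name_loop_eq (n : Nat) (l : List Char) (count : Nat) :
    coloured_name_loop n l count =
      (l.take (n / 2 + 1 - count)).flatMap (coloured_name_wrap "\x1b[0;33;40m".toList)
      ++ (l.drop (n / 2 + 1 - count)).flatMap (coloured_name_wrap "\x1b[0;34;40m".toList) := by
  induction l generalizing count with
  | nil => simp [coloured_name_loop]
  | cons c cs ih =>
    by_cases h : 2 * count ≤ n
    · have hk : n / 2 + 1 - count = (n / 2 + 1 - (count + 1)) + 1 := by omega
      simp [coloured_name_loop, h, hk, ih (count + 1), coloured_name_wrap]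
    · have hk : n / 2 + 1 - count = 0 := by omega
      have hk' : n / 2 + 1 - (count + 1) = 0 := by omega
      simp [coloured_name_loop, h, hk, hk', ih (count + 1), coloured_name_wrap]

-- ===== VERDICT (by name: the statement is the Claim_ definition above) =====
theorem coloured_name_spec : Claim_equal_coloured_name := by
  intro g _
  unfold Spec_coloured_name coloured_name coloured_name_alt
  simp [coloured_name_loop_eq]
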